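-- pv_equiv track=rewrite | github.com/ana-bagic/OOP | lab02/z3.py | mymax2
-- ===== SOURCE A (Python) =====
-- def mymax2(iterable):
--     key = lambda x: x
--     max_x = max_key = None
--     for x in iterable:
--         if max_x is None or key(x) > max_key:
--             max_key = key(x)
--             max_x = x
--     return max_x
-- ===== SOURCE B (Python) =====
-- def mymax2(iterable):
--     xs = list(iterable)
--     if not xs:
--         return None
--
--     def tour(lo, hi):
--         if hi - lo <= 1:
--             return xs[lo]
--         mid = (lo + hi) // 2
--         l = tour(lo, mid)
--         r = tour(mid, hi)
--         return r if r > l else l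
--
--     return tour(0, len(xs))
-- ===== Notes on version B (the rewrite author's own statement) =====
-- stated objective: alternative
-- what changed: Replaces A's single linear scan with None-sentinel state by a divide-and-conquer tournament: materialise the iterable, recursively split the index range in halves and combine the two sub-maxima with strict >, left winning ties.
import Mathlib
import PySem

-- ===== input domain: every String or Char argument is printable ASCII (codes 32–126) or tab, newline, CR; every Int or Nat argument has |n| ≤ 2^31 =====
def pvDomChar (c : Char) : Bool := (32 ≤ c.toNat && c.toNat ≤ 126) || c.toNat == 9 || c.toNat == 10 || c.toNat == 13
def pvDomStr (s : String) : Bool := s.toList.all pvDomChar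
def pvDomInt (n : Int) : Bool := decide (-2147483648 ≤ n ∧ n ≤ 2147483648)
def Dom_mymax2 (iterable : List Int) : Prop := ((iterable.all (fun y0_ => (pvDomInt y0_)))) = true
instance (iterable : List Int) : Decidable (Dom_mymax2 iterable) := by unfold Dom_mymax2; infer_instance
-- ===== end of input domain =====

-- B replaces A's linear None-sentinel scan by a divide-and-conquer tournament over index halves (alternative).

-- ===== PORT A =====
-- state = (max_x, max_key); the loop body updates both when max_x is None or x > max_key
def mymax2Step (s : Option Int × Option Int) (x : Int) : Option Int × Option Int :=
  if s.1 = none ∨ (∀ k ∈ s.2, x > k) then (some x, some x) else s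

def mymax2 (iterable : List Int) : Option Int :=
  (iterable.foldl mymax2Step (none, none)).1

-- ===== PORT B =====
-- tour(lo, hi) from Source B: recursive tournament over the index range [lo, hi)
def mymax2Tour (xs : List Int) (lo hi : Nat) : Int :=
  if _h : hi - lo ≤ 1 then xs.getD lo 0
  else
    let mid := (lo + hi) / 2
    let l := mymax2Tour xs lo mid
    let r := mymax2Tour xs mid hi
    if r > l then r else l
termination_by hi - lo
decreasing_by all_goals omega

def mymax2_alt (iterable : List Int) : Option Int :=
  match iterable with
  | [] => none
  | _ :: _ => some (mymax2Tour iterable 0 iterable.length)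

-- ===== PRECONDITION & SPEC =====
def Spec_mymax2 (iterable : List Int) (out : Option Int) : Prop := out = mymax2_alt iterable
instance (iterable : List Int) (out : Option Int) : Decidable (Spec_mymax2 iterable out) := by unfold Spec_mymax2; infer_instance

-- ===== CLAIM (what is proved, stated in full; the proofs are below) =====
def Claim_equal_mymax2 : Prop := ∀ (iterable : List Int), Dom_mymax2 iterable → Spec_mymax2 iterable (mymax2 iterable)

-- ===== LEMMAS AND PROOFS =====

-- A's loop body on a seeded state is a fold of `max`
theorem mymax2_fold_inv (t : List Int) (m : Int) :
    t.foldl mymax2Step (some m, some m)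
      = (some (t.foldl max m), some (t.foldl max m)) := by
  induction t generalizing m with
  | nil => rfl
  | cons x t ih =>
      simp only [List.foldl, mymax2Step]
      by_cases h : x > m
      · simp [h, ih, max_eq_right (le_of_lt h)]
      · simp [h, ih, max_eq_left (by omega : x ≤ m)]

theorem foldl_max_comm (t : List Int) (a b : Int) :
    t.foldl max (max a b) = max a (t.foldl max b) := by
  induction t generalizing b with
  | nil => rfl
  | cons x t ih =>
      simp only [List.foldl, max_assoc, ih]

-- fold-of-max over the nonempty segment [lo, hi) of xs
def segMax (xs : List Int) (lo hi : Nat) : Int :=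
  ((xs.drop lo).take (hi - lo)).foldl max (xs.getD lo 0)

theorem segMax_split (xs : List Int) (lo mid hi : Nat)
    (h1 : lo < mid) (h2 : mid < hi) (h3 : hi ≤ xs.length) :
    segMax xs lo hi = max (segMax xs lo mid) (segMax xs mid hi) := by
  unfold segMax
  have hsplit : (xs.drop lo).take (hi - lo)
      = (xs.drop lo).take (mid - lo) ++ (xs.drop mid).take (hi - mid) := by
    have : hi - lo = (mid - lo) + (hi - mid) := by omega
    rw [this, List.take_add, List.drop_drop]
    have h4 : lo + (mid - lo) = mid := by omega
    rw [h4]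
  rw [hsplit, List.foldl_append]
  -- peel the heads of the two segments
  have hmid : mid < xs.length := by omega
  have hdropm : xs.drop mid = xs[mid] :: xs.drop (mid + 1) :=
    List.drop_eq_getElem_cons hmid
  have hgetm : xs.getD mid 0 = xs[mid] := List.getD_eq_getElem xs 0 hmid
  rw [hdropm]
  have hk : hi - mid = (hi - mid - 1) + 1 := by omega
  rw [hk]
  simp only [List.take_succ_cons, List.foldl_cons, hgetm]
  rw [foldl_max_comm]
  simp [max_self]

theorem mymax2Tour_eq (xs : List Int) :
    ∀ n lo hi, hi - lo = n → lo < hi → hi ≤ xs.length →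
      mymax2Tour xs lo hi = segMax xs lo hi := by
  intro n
  induction n using Nat.strong_induction_on with
  | _ n ih =>
    intro lo hi hn hlt hle
    rw [mymax2Tour]
    by_cases hb : hi - lo ≤ 1
    · simp only [dif_pos hb]
      have hone : hi - lo = 1 := by omega
      have hlo : lo < xs.length := by omega
      unfold segMax
      rw [hone]
      have : (xs.drop lo).take 1 = xs[lo] :: ([] : List Int) := by
        rw [List.drop_eq_getElem_cons hlo]; rfl
      rw [this]
      simp [List.getD_eq_getElem?_getD, List.getElem?_eq_getElem hlo]
    · simp only [dif_neg hb]
      have hmid1 : lo < (lo + hi) / 2 := by omega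
      have hmid2 : (lo + hi) / 2 < hi := by omega
      rw [ih ((lo + hi) / 2 - lo) (by omega) lo ((lo + hi) / 2) rfl hmid1 (by omega),
          ih (hi - (lo + hi) / 2) (by omega) ((lo + hi) / 2) hi rfl hmid2 hle,
          segMax_split xs lo ((lo + hi) / 2) hi hmid1 hmid2 hle]
      rcases le_or_gt (segMax xs ((lo + hi) / 2) hi) (segMax xs lo ((lo + hi) / 2)) with h | h
      · simp [not_lt.mpr h, max_eq_left h]
      · simp [h, max_eq_right (le_of_lt h)]

-- ===== VERDICT (by name: the statement is the Claim_ definition above) =====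
theorem mymax2_spec : Claim_equal_mymax2 := by
  intro iterable _
  unfold Spec_mymax2 mymax2 mymax2_alt
  cases iterable with
  | nil => rfl
  | cons x t =>
      simp only [List.foldl, mymax2Step, List.length_cons]
      simp only [true_or, if_pos]
      rw [mymax2_fold_inv]
      rw [mymax2Tour_eq (x :: t) (t.length + 1) 0 (t.length + 1) rfl (by omega) (by simp)]
      unfold segMax
      simp
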